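-- pv_equiv track=rewrite | github.com/tageniu/Agent-S | gui_agents/s2_5/agents/hybrid_agent.py | _select_mode
-- ===== SOURCE A (Python) =====
-- from typing import Dict, List, Tuple
--
-- def _select_mode(instruction: str, observation: Dict) -> str:
--     """Select the appropriate mode (GUI or Coding) based on the task"""
--     # For now, we'll use a simple heuristic
--     # In a more advanced implementation, we could use an LLM to decide
--
--     # Keywords that suggest coding might be needed
--     coding_keywords = [
--         "script", "code", "program", "calculate", "process data",
--         "analyze", "file", "API", "web", "scrape", "automation",
--         "math", "convert", "transform", "sort", "filter", "data analysis",
--         "parse", "extract", "download", "upload", "backup"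
--     ]
--
--     instruction_lower = instruction.lower()
--     for keyword in coding_keywords:
--         if keyword in instruction_lower:
--             return "coding"
--
--     # Default to GUI for most tasks
--     return "gui"
-- ===== SOURCE B (Python) =====
-- def _select_mode(instruction, observation):
--     """Select the appropriate mode (GUI or Coding) based on the task"""
--     coding_keywords = [
--         "script", "code", "program", "calculate", "process data",
--         "analyze", "file", "API", "web", "scrape", "automation",
--         "math", "convert", "transform", "sort", "filter", "data analysis",
--         "parse", "extract", "download", "upload", "backup"
--     ]
--     s = instruction.lower()
--     # single left-to-right pass over the string: at each position, test
--     # whether any keyword starts there (instead of one full scan per keyword)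
--     for i in range(len(s) + 1):
--         for k in coding_keywords:
--             if s.startswith(k, i):
--                 return "coding"
--     return "gui"
-- ===== Notes on version B (the rewrite author's own statement) =====
-- stated objective: alternative
-- what changed: Replaces A's per-keyword substring scans (one full pass over the instruction for each keyword) by a single left-to-right positional scan that at each index tests whether any keyword starts there.
import Mathlib
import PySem

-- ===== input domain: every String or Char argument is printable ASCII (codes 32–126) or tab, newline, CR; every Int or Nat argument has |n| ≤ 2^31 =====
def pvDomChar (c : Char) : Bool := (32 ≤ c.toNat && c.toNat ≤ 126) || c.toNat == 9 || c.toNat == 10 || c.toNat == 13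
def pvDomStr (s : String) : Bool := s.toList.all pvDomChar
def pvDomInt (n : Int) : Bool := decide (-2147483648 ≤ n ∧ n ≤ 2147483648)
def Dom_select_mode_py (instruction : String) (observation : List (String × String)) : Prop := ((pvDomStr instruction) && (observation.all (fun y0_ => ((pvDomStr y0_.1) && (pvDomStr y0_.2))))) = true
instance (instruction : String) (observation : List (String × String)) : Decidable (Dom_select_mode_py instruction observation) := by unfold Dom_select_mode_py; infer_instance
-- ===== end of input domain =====

-- B replaces A's per-keyword substring scans by one left-to-right positional scan over the
-- lowered instruction (alternative decomposition, same exact result; 'observation' unused by both).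


-- the keyword list (shared module constant; identical literal in both Pythons)
def pvKeywords : List String :=
  ["script", "code", "program", "calculate", "process data",
   "analyze", "file", "API", "web", "scrape", "automation",
   "math", "convert", "transform", "sort", "filter", "data analysis",
   "parse", "extract", "download", "upload", "backup"]

-- ===== PORT A =====
-- A's loop: for keyword in coding_keywords: if keyword in instruction_lower: return "coding"
def pvALoop : List String → List Char → String
  | [], _ => "gui"
  | k :: ks, s => if PySem.Chars.isIn k.toList s then "coding" else pvALoop ks s

def select_mode_py (instruction : String) (observation : List (String × String)) : String :=
  pvALoop pvKeywords (PySem.Chars.lower instruction.toList)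

-- ===== PORT B =====
-- B's inner loop: does any keyword start at this position (suffix t)?
def pvAnyHere (t : List Char) : Bool :=
  pvKeywords.any (fun k => PySem.Chars.startswith t k.toList)

-- B's outer loop: for i in range(len(s)+1): … — one pass over the suffixes of s
def pvScan : List Char → Bool
  | [] => pvAnyHere []
  | c :: rest => pvAnyHere (c :: rest) || pvScan rest

def select_mode_py_alt (instruction : String) (observation : List (String × String)) : String :=
  if pvScan (PySem.Chars.lower instruction.toList) then "coding" else "gui"

-- ===== PRECONDITION & SPEC =====
def Spec_select_mode_py (instruction : String) (observation : List (String × String)) (out : String) : Prop := out = select_mode_py_alt instruction observation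
instance (instruction : String) (observation : List (String × String)) (out : String) : Decidable (Spec_select_mode_py instruction observation out) := by unfold Spec_select_mode_py; infer_instance

-- ===== CLAIM (what is proved, stated in full; the proofs are below) =====
def Claim_equal_select_mode_py : Prop := ∀ (instruction : String) (observation : List (String × String)), Dom_select_mode_py instruction observation → Spec_select_mode_py instruction observation (select_mode_py instruction observation)

-- ===== LEMMAS AND PROOFS =====

-- A's loop is the if-then-else on "some keyword occurs as infix"
theorem pvALoop_eq (ks : List String) (s : List Char) :
    pvALoop ks s = (if ks.any (fun k => PySem.Chars.isIn k.toList s) then "coding" else "gui") := by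
  induction ks with
  | nil => simp [pvALoop]
  | cons k ks ih =>
    by_cases h : PySem.Chars.isIn k.toList s = true <;>
      simp [pvALoop, h, ih]

-- B's scan succeeds iff some suffix has a keyword as prefix
theorem pvScan_iff (s : List Char) :
    pvScan s = true ↔ ∃ t, t <:+ s ∧ pvAnyHere t = true := by
  induction s with
  | nil =>
    simp [pvScan, List.suffix_nil]
  | cons c rest ih =>
    simp [pvScan, Bool.or_eq_true, ih]
    constructor
    · rintro (h | ⟨t, ht, h⟩)
      · exact ⟨c :: rest, List.suffix_rfl, h⟩
      · exact ⟨t, ht.trans (List.suffix_cons c rest), h⟩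
    · rintro ⟨t, ht, h⟩
      rcases List.suffix_cons_iff.mp ht with h1 | h2
      · subst h1; exact Or.inl h
      · exact Or.inr ⟨t, h2, h⟩

-- the two success conditions coincide
theorem pvScan_eq_any (s : List Char) :
    pvScan s = (pvKeywords.any (fun k => PySem.Chars.isIn k.toList s)) := by
  by_cases h : (pvKeywords.any (fun k => PySem.Chars.isIn k.toList s)) = true
  · rw [h, pvScan_iff]
    rcases List.any_eq_true.mp h with ⟨k, hk, hin⟩
    rcases List.infix_iff_prefix_suffix.mp ((PySem.Chars.isIn_iff_infix _ _).mp hin) with ⟨t, hp, hs⟩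
    exact ⟨t, hs, List.any_eq_true.mpr ⟨k, hk, (PySem.Chars.startswith_iff _ _).mpr hp⟩⟩
  · rw [Bool.not_eq_true] at h
    rw [h, ← Bool.not_eq_true, pvScan_iff]
    rintro ⟨t, ht, hh⟩
    rcases List.any_eq_true.mp hh with ⟨k, hk, hpref⟩
    have hIn : PySem.Chars.isIn k.toList s = true :=
      (PySem.Chars.isIn_iff_infix _ _).mpr (List.infix_iff_prefix_suffix.mpr ⟨t, (PySem.Chars.startswith_iff _ _).mp hpref, ht⟩)
    have : (pvKeywords.any (fun k => PySem.Chars.isIn k.toList s)) = true :=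
      List.any_eq_true.mpr ⟨k, hk, hIn⟩
    simp [this] at h

-- ===== VERDICT (by name: the statement is the Claim_ definition above) =====
theorem select_mode_py_spec : Claim_equal_select_mode_py := by
  intro instruction observation _
  unfold Spec_select_mode_py select_mode_py select_mode_py_alt
  rw [pvALoop_eq, pvScan_eq_any]
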